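-- pv_equiv track=rewrite | github.com/Foundup/Foundups-Agent | modules/wre_core/src/components/orchestration/wsp30_orchestrator.py | _determine_enterprise_domain
-- ===== SOURCE A (Python) =====
-- def _determine_enterprise_domain(module_path: str) -> str:
--     """Determine the enterprise domain for a module based on WSP_3."""
--     # Extract domain from path or analyze module concept
--     if '/' in module_path:
--         potential_domain = module_path.split('/')[0]
--         valid_domains = [
--             'ai_intelligence', 'communication', 'platform_integration',
--             'infrastructure', 'foundups', 'gamification', 'blockchain', 'wre_core'
--         ]
--         if potential_domain in valid_domains:
--             return potential_domain
--
--     # Default classification logic based on module name/concept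
--     module_name = module_path.split('/')[-1].lower()
--
--     if any(keyword in module_name for keyword in ['ai', 'llm', 'banter', 'semantic', 'consciousness']):
--         return 'ai_intelligence'
--     elif any(keyword in module_name for keyword in ['chat', 'message', 'communication', 'protocol']):
--         return 'communication'
--     elif any(keyword in module_name for keyword in ['youtube', 'linkedin', 'twitter', 'oauth', 'api']):
--         return 'platform_integration'
--     elif any(keyword in module_name for keyword in ['agent', 'auth', 'session', 'gateway', 'core']):
--         return 'infrastructure'
--     elif any(keyword in module_name for keyword in ['foundup', 'instance', 'execution']):
--         return 'foundups'
--     elif any(keyword in module_name for keyword in ['game', 'reward', 'token', 'engagement']):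
--         return 'gamification'
--     elif any(keyword in module_name for keyword in ['blockchain', 'chain', 'crypto', 'dae']):
--         return 'blockchain'
--     elif any(keyword in module_name for keyword in ['wre', 'engine', 'orchestrat']):
--         return 'wre_core'
--     else:
--         return 'infrastructure'  # Default fallback
-- ===== SOURCE B (Python) =====
-- _KEYWORD_PRIORITY = {
--     'ai': 0, 'llm': 0, 'banter': 0, 'semantic': 0, 'consciousness': 0,
--     'chat': 1, 'message': 1, 'communication': 1, 'protocol': 1,
--     'youtube': 2, 'linkedin': 2, 'twitter': 2, 'oauth': 2, 'api': 2,
--     'agent': 3, 'auth': 3, 'session': 3, 'gateway': 3, 'core': 3,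
--     'foundup': 4, 'instance': 4, 'execution': 4,
--     'game': 5, 'reward': 5, 'token': 5, 'engagement': 5,
--     'blockchain': 6, 'chain': 6, 'crypto': 6, 'dae': 6,
--     'wre': 7, 'engine': 7, 'orchestrat': 7,
-- }
--
-- _DOMAINS = (
--     'ai_intelligence', 'communication', 'platform_integration', 'infrastructure',
--     'foundups', 'gamification', 'blockchain', 'wre_core',
--     'infrastructure',  # index 8: no keyword matched -> default
-- )
--
--
-- def _determine_enterprise_domain(module_path: str) -> str:
--     parts = module_path.split('/')
--     if '/' in module_path and parts[0] in _DOMAINS[:8]: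
--         return parts[0]
--     name = parts[-1].lower()
--     best = 8
--     for keyword, priority in _KEYWORD_PRIORITY.items():
--         if priority < best and keyword in name:
--             best = priority
--     return _DOMAINS[best]
-- ===== Notes on version B (the rewrite author's own statement) =====
-- stated objective: alternative
-- what changed: Replaces the eight-branch if/elif chain of grouped any() tests and early returns by a single running-minimum accumulator pass over a flat keyword->priority map, then one indexing into a domains tuple (index 8 = default).
import Mathlib
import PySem

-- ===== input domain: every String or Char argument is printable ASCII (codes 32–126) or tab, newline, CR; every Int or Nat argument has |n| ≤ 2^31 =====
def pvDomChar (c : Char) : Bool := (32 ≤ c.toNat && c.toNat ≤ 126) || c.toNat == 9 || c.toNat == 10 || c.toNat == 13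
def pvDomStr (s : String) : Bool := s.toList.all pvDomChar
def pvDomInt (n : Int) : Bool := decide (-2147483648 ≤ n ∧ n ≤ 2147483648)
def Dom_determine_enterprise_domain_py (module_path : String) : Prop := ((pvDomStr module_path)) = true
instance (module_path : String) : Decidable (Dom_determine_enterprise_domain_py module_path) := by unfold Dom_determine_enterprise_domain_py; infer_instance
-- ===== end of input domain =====

-- B replaces A's eight-branch if/elif chain (grouped any() tests, early returns) by one
-- running-minimum pass over a flat keyword->priority map plus an index into a domains
-- tuple; same return value on every input (alternative decomposition, same cost).

-- ===== PORT A =====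
-- A's split('/')[0] and split('/')[-1]: split? with nonempty sep always returns a
-- nonempty list, so the .getD []/.headD ""/.getLastD "" defaults are never used.
def determine_enterprise_domain_py (module_path : String) : String :=
  let early : Option String :=
    if PySem.Str.isIn "/" module_path then
      let potential_domain := ((PySem.Str.split? module_path "/").getD []).headD ""
      let valid_domains := ["ai_intelligence", "communication", "platform_integration",
        "infrastructure", "foundups", "gamification", "blockchain", "wre_core"]
      if valid_domains.contains potential_domain then some potential_domain else none
    else none
  match early with
  | some d => d
  | none =>
    let module_name := PySem.Str.lower (((PySem.Str.split? module_path "/").getD []).getLastD "")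
    if ["ai", "llm", "banter", "semantic", "consciousness"].any (fun k => PySem.Str.isIn k module_name) then "ai_intelligence"
    else if ["chat", "message", "communication", "protocol"].any (fun k => PySem.Str.isIn k module_name) then "communication"
    else if ["youtube", "linkedin", "twitter", "oauth", "api"].any (fun k => PySem.Str.isIn k module_name) then "platform_integration"
    else if ["agent", "auth", "session", "gateway", "core"].any (fun k => PySem.Str.isIn k module_name) then "infrastructure"
    else if ["foundup", "instance", "execution"].any (fun k => PySem.Str.isIn k module_name) then "foundups"
    else if ["game", "reward", "token", "engagement"].any (fun k => PySem.Str.isIn k module_name) then "gamification"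
    else if ["blockchain", "chain", "crypto", "dae"].any (fun k => PySem.Str.isIn k module_name) then "blockchain"
    else if ["wre", "engine", "orchestrat"].any (fun k => PySem.Str.isIn k module_name) then "wre_core"
    else "infrastructure"

-- ===== PORT B =====
-- the flat keyword -> priority dict of Source B, in its insertion order
def kwPriority : List (String × Nat) :=
  [("ai", 0), ("llm", 0), ("banter", 0), ("semantic", 0), ("consciousness", 0),
   ("chat", 1), ("message", 1), ("communication", 1), ("protocol", 1),
   ("youtube", 2), ("linkedin", 2), ("twitter", 2), ("oauth", 2), ("api", 2),
   ("agent", 3), ("auth", 3), ("session", 3), ("gateway", 3), ("core", 3),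
   ("foundup", 4), ("instance", 4), ("execution", 4),
   ("game", 5), ("reward", 5), ("token", 5), ("engagement", 5),
   ("blockchain", 6), ("chain", 6), ("crypto", 6), ("dae", 6),
   ("wre", 7), ("engine", 7), ("orchestrat", 7)]

-- the _DOMAINS tuple of Source B (index 8 = default)
def domainsB : List String :=
  ["ai_intelligence", "communication", "platform_integration", "infrastructure",
   "foundups", "gamification", "blockchain", "wre_core", "infrastructure"]

-- B's loop body ('if priority < best and keyword in name: best = priority')
def pvStep (m : String) (b : Nat) (p : String × Nat) : Nat :=
  if decide (p.2 < b) && PySem.Str.isIn p.1 m then p.2 else b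

def determine_enterprise_domain_py_alt (module_path : String) : String :=
  let parts := (PySem.Str.split? module_path "/").getD []
  if PySem.Str.isIn "/" module_path && (domainsB.take 8).contains (parts.headD "") then
    parts.headD ""
  else
    let name := PySem.Str.lower (parts.getLastD "")
    let best := kwPriority.foldl (pvStep name) 8
    domainsB.getD best "infrastructure"

-- ===== PRECONDITION & SPEC =====
def Spec_determine_enterprise_domain_py (module_path : String) (out : String) : Prop := out = determine_enterprise_domain_py_alt module_path
instance (module_path : String) (out : String) : Decidable (Spec_determine_enterprise_domain_py module_path out) := by unfold Spec_determine_enterprise_domain_py; infer_instance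

-- ===== CLAIM (what is proved, stated in full; the proofs are below) =====
def Claim_equal_determine_enterprise_domain_py : Prop := ∀ (module_path : String), Dom_determine_enterprise_domain_py module_path → Spec_determine_enterprise_domain_py module_path (determine_enterprise_domain_py module_path)

-- ===== LEMMAS AND PROOFS =====

-- once the running minimum b is ≤ every remaining priority, the rest of the loop is a no-op
theorem pvFold_skip (m : String) (l : List (String × Nat)) (b : Nat)
    (h : ∀ x ∈ l, b ≤ x.2) : l.foldl (pvStep m) b = b := by
  induction l with
  | nil => rfl
  | cons x t ih =>
    have hx : ¬ x.2 < b := not_lt.mpr (h x (List.mem_cons_self ..))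
    simp only [List.foldl_cons, pvStep, hx, decide_false, Bool.false_and]
    exact ih (fun y hy => h y (List.mem_cons_of_mem _ hy))

-- specialisation: a constant-priority group with b ≤ p is skipped entirely
theorem pvFold_group_skip (m : String) (ks : List String) (p b : Nat) (hb : b ≤ p) :
    (ks.map (fun k => (k, p))).foldl (pvStep m) b = b :=
  pvFold_skip m _ b (by intro x hx; obtain ⟨k, -, rfl⟩ := List.mem_map.mp hx; exact hb)

-- one constant-priority group of keywords: the loop either lowers b to p (some keyword
-- matched) or leaves it unchanged
theorem pvFold_group (m : String) (ks : List String) (p : Nat) (b : Nat) (hb : p < b) :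
    (ks.map (fun k => (k, p))).foldl (pvStep m) b
      = if ks.any (fun k => PySem.Str.isIn k m) then p else b := by
  induction ks generalizing b with
  | nil => simp
  | cons k t ih =>
    simp only [List.map_cons, List.foldl_cons, List.any_cons, pvStep, hb, decide_true,
      Bool.true_and]
    by_cases hk : PySem.Str.isIn k m = true
    · simp only [hk, if_true, Bool.true_or]
      exact pvFold_group_skip m t p p (le_refl p)
    · have hk' : PySem.Str.isIn k m = false := by rwa [← Bool.not_eq_true]
      simp only [hk', Bool.false_or, Bool.false_eq_true, if_false]
      exact ih b hb

-- the whole loop over groups with strictly increasing priorities, all below b: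
-- the result is the priority of the first group with a matching keyword (else b)
theorem pvFold_groups (m : String) (gs : List (List String × Nat)) (b : Nat)
    (hsorted : gs.Pairwise (fun g h => g.2 < h.2)) (hb : ∀ g ∈ gs, g.2 < b) :
    (gs.flatMap (fun g => g.1.map (fun k => (k, g.2)))).foldl (pvStep m) b
      = ((gs.find? (fun g => g.1.any (fun k => PySem.Str.isIn k m))).map (fun g => g.2)).getD b := by
  induction gs generalizing b with
  | nil => rfl
  | cons g t ih =>
    rw [List.flatMap_cons, List.foldl_append,
      pvFold_group m g.1 g.2 b (hb g (List.mem_cons_self ..)), List.find?_cons]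
    by_cases hg : g.1.any (fun k => PySem.Str.isIn k m) = true
    · simp only [hg, if_true]
      rw [pvFold_skip m _ g.2 ?later]
      · rfl
      case later =>
        intro x hx
        obtain ⟨h', hh', hxh⟩ := List.mem_flatMap.mp hx
        obtain ⟨k, -, rfl⟩ := List.mem_map.mp hxh
        exact le_of_lt ((List.pairwise_cons.mp hsorted).1 h' hh')
    · have hg' : g.1.any (fun k => PySem.Str.isIn k m) = false := by rwa [← Bool.not_eq_true]
      simp only [hg', Bool.false_eq_true, if_false]
      exact ih b (List.pairwise_cons.mp hsorted).2 (fun h' hh' => hb h' (List.mem_cons_of_mem _ hh'))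

-- the eight groups of Source B's flat dict, in order
def pvGroups : List (List String × Nat) :=
  [(["ai", "llm", "banter", "semantic", "consciousness"], 0),
   (["chat", "message", "communication", "protocol"], 1),
   (["youtube", "linkedin", "twitter", "oauth", "api"], 2),
   (["agent", "auth", "session", "gateway", "core"], 3),
   (["foundup", "instance", "execution"], 4),
   (["game", "reward", "token", "engagement"], 5),
   (["blockchain", "chain", "crypto", "dae"], 6),
   (["wre", "engine", "orchestrat"], 7)]

-- A's keyword chain equals B's flat running-minimum pass followed by the table lookup
theorem pvFallback_eq (m : String) :
    (if ["ai", "llm", "banter", "semantic", "consciousness"].any (fun k => PySem.Str.isIn k m) then "ai_intelligence"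
    else if ["chat", "message", "communication", "protocol"].any (fun k => PySem.Str.isIn k m) then "communication"
    else if ["youtube", "linkedin", "twitter", "oauth", "api"].any (fun k => PySem.Str.isIn k m) then "platform_integration"
    else if ["agent", "auth", "session", "gateway", "core"].any (fun k => PySem.Str.isIn k m) then "infrastructure"
    else if ["foundup", "instance", "execution"].any (fun k => PySem.Str.isIn k m) then "foundups"
    else if ["game", "reward", "token", "engagement"].any (fun k => PySem.Str.isIn k m) then "gamification"
    else if ["blockchain", "chain", "crypto", "dae"].any (fun k => PySem.Str.isIn k m) then "blockchain"
    else if ["wre", "engine", "orchestrat"].any (fun k => PySem.Str.isIn k m) then "wre_core"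
    else "infrastructure") =
    domainsB.getD (kwPriority.foldl (pvStep m) 8) "infrastructure" := by
  rw [show kwPriority = pvGroups.flatMap (fun g => g.1.map (fun k => (k, g.2))) from rfl,
    pvFold_groups m pvGroups 8 (by decide) (by decide)]
  simp only [pvGroups, List.find?_cons]
  set c1 := ["ai", "llm", "banter", "semantic", "consciousness"].any (fun k => PySem.Str.isIn k m) with e1
  set c2 := ["chat", "message", "communication", "protocol"].any (fun k => PySem.Str.isIn k m) with e2
  set c3 := ["youtube", "linkedin", "twitter", "oauth", "api"].any (fun k => PySem.Str.isIn k m) with e3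
  set c4 := ["agent", "auth", "session", "gateway", "core"].any (fun k => PySem.Str.isIn k m) with e4
  set c5 := ["foundup", "instance", "execution"].any (fun k => PySem.Str.isIn k m) with e5
  set c6 := ["game", "reward", "token", "engagement"].any (fun k => PySem.Str.isIn k m) with e6
  set c7 := ["blockchain", "chain", "crypto", "dae"].any (fun k => PySem.Str.isIn k m) with e7
  set c8 := ["wre", "engine", "orchestrat"].any (fun k => PySem.Str.isIn k m) with e8
  cases c1 <;> first
  | rfl
  | (cases c2 <;> first
    | rfl
    | (cases c3 <;> first
      | rfl
      | (cases c4 <;> first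
        | rfl
        | (cases c5 <;> first
          | rfl
          | (cases c6 <;> first
            | rfl
            | (cases c7 <;> first
              | rfl
              | (cases c8 <;> rfl)))))))

-- ===== VERDICT (by name: the statement is the Claim_ definition above) =====
theorem determine_enterprise_domain_py_spec : Claim_equal_determine_enterprise_domain_py := by
  intro s _
  unfold Spec_determine_enterprise_domain_py determine_enterprise_domain_py determine_enterprise_domain_py_alt
  by_cases hs : PySem.Str.isIn "/" s = true
  · by_cases hd : (["ai_intelligence", "communication", "platform_integration",
        "infrastructure", "foundups", "gamification", "blockchain", "wre_core"] : List String).contains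
        (((PySem.Str.split? s "/").getD []).headD "") = true
    · rw [if_pos hs, if_pos hd,
        if_pos (show (PySem.Str.isIn "/" s && (domainsB.take 8).contains
          (((PySem.Str.split? s "/").getD []).headD "")) = true by rw [hs, Bool.true_and]; exact hd)]
    · rw [if_pos hs, if_neg hd,
        if_neg (show ¬ (PySem.Str.isIn "/" s && (domainsB.take 8).contains
          (((PySem.Str.split? s "/").getD []).headD "")) = true by rw [hs, Bool.true_and]; exact hd)]
      exact pvFallback_eq _
  · rw [if_neg hs,
      if_neg (show ¬ (PySem.Str.isIn "/" s && (domainsB.take 8).contains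
        (((PySem.Str.split? s "/").getD []).headD "")) = true by
          simp only [Bool.and_eq_true]; intro h; exact hs h.1)]
    exact pvFallback_eq _
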